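-- pv_equiv track=rewrite | github.com/MarcinGladkowski/advent_of_code_2023 | day_11/main.py | expand_row
-- ===== SOURCE A (Python) =====
-- def expand_row(universum_row: list, expanders: list, expander_sign: str = '.', multiplier: int = 1) -> list:
--     for i, expander in enumerate(expanders):
--
--         if i == 0:
--             for j in range(1, multiplier + 1):
--                 universum_row.insert(expander + i, expander_sign)
--         else:
--             for j in range(1, multiplier + 1):
--                 universum_row.insert(expander + multiplier + i, expander_sign)
--
--     return universum_row
-- ===== SOURCE B (Python) =====
-- def expand_row(universum_row: list, expanders: list, expander_sign: str = '.', multiplier: int = 1) -> list: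
--     # Splice a whole block of signs per expander via slice assignment: no inner per-copy loop.
--     block = [expander_sign] * multiplier
--     for i, expander in enumerate(expanders):
--         pos = expander if i == 0 else expander + multiplier + i
--         universum_row[pos:pos] = block
--     return universum_row
-- ===== Notes on version B (the rewrite author's own statement) =====
-- stated objective: faster
-- what changed: A inserts the sign one element at a time (multiplier separate insert calls per expander, each shifting the tail); B splices the whole pre-built block of signs in one slice assignment per expander, eliminating the inner loop.
import Mathlib
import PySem

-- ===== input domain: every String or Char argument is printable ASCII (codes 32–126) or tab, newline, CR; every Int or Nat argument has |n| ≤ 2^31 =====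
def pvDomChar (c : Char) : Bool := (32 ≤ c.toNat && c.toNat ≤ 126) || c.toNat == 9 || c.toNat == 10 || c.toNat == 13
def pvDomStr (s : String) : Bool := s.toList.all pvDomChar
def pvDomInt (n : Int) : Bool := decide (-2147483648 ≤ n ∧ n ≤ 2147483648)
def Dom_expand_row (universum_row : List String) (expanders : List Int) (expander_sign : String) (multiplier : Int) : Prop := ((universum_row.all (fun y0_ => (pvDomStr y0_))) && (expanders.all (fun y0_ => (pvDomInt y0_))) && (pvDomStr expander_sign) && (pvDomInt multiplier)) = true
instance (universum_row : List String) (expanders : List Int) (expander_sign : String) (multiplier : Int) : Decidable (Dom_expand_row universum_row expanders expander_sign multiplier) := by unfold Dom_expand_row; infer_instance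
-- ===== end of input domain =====

-- B replaces A's inner per-copy insert loop by one slice-assignment splice of the whole
-- block of signs per expander (same final list; both Pythons mutate the argument alike).

-- ===== PORT A =====
def expand_row (universum_row : List String) (expanders : List Int) (expander_sign : String) (multiplier : Int) : List String :=
  (PySem.List.enumerate expanders 0).foldl (fun row ie =>
    if ie.1 == 0 then
      (PySem.List.pyRange 1 (multiplier + 1) 1).foldl
        (fun r _ => PySem.List.insert r (ie.2 + ie.1) expander_sign) row
    else
      (PySem.List.pyRange 1 (multiplier + 1) 1).foldl
        (fun r _ => PySem.List.insert r (ie.2 + multiplier + ie.1) expander_sign) row) universum_row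

-- ===== PORT B =====
-- Python slice assignment row[p:p] = block (start index clamped as Python does; exact for every Int p)
def clampIdx (p : Int) (n : Nat) : Nat :=
  (if p < 0 then max (p + n) 0 else min p (n : Int)).toNat

def spliceAt (row : List String) (p : Int) (block : List String) : List String :=
  row.take (clampIdx p row.length) ++ block ++ row.drop (clampIdx p row.length)

def expand_row_alt (universum_row : List String) (expanders : List Int) (expander_sign : String) (multiplier : Int) : List String :=
  let block := List.replicate multiplier.toNat expander_sign
  (PySem.List.enumerate expanders 0).foldl (fun row ie =>
    spliceAt row (if ie.1 == 0 then ie.2 else ie.2 + multiplier + ie.1) block) universum_row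

-- ===== PRECONDITION & SPEC =====
def Spec_expand_row (universum_row : List String) (expanders : List Int) (expander_sign : String) (multiplier : Int) (out : List String) : Prop := out = expand_row_alt universum_row expanders expander_sign multiplier
instance (universum_row : List String) (expanders : List Int) (expander_sign : String) (multiplier : Int) (out : List String) : Decidable (Spec_expand_row universum_row expanders expander_sign multiplier out) := by unfold Spec_expand_row; infer_instance

-- ===== CLAIM (what is proved, stated in full; the proofs are below) =====
def Claim_equal_expand_row : Prop := ∀ (universum_row : List String) (expanders : List Int) (expander_sign : String) (multiplier : Int), Dom_expand_row universum_row expanders expander_sign multiplier → Spec_expand_row universum_row expanders expander_sign multiplier (expand_row universum_row expanders expander_sign multiplier)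

-- ===== LEMMAS AND PROOFS =====

-- Python's list.insert = splice of a singleton at the clamped index
theorem insert_eq_spliceAt (row : List String) (p : Int) (x : String) :
    PySem.List.insert row p x = spliceAt row p [x] := by
  simp [PySem.List.insert, PySem.List.sliceIndices, spliceAt, clampIdx]

theorem clampIdx_le (p : Int) (n : Nat) : clampIdx p n ≤ n := by
  unfold clampIdx; split <;> omega

-- a fold that ignores the elements is an iterate
theorem foldl_const_iterate {α β : Type} (f : β → β) (l : List α) (b : β) :
    l.foldl (fun r _ => f r) b = f^[l.length] b := by
  induction l generalizing b with
  | nil => rfl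
  | cons a t ih => simp [List.foldl_cons, ih, Function.iterate_succ_apply]

-- splicing at a list position q' that is q or q+1 around an inserted copy
theorem splice_aux (t d : List String) (x : String) (k q q' : Nat)
    (ht : t.length = q) (h : q' = q ∨ q' = q + 1) :
    (t ++ [x] ++ d).take q' ++ List.replicate k x ++ (t ++ [x] ++ d).drop q'
      = t ++ List.replicate (k + 1) x ++ d := by
  rcases h with h | h
  · subst h; rw [← ht, List.append_assoc t [x] d, List.take_left, List.drop_left]
    simp [List.replicate_succ', List.append_assoc]
  · subst h
    have ht2 : (t ++ [x]).length = q + 1 := by simp [ht]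
    rw [← ht2, List.take_left, List.drop_left]
    simp [List.replicate_succ, List.append_assoc]

-- splicing one copy then k more copies at the same position = splicing k+1 copies
theorem spliceAt_spliceAt (row : List String) (p : Int) (x : String) (k : Nat) :
    spliceAt (spliceAt row p [x]) p (List.replicate k x)
      = spliceAt row p (List.replicate (k + 1) x) := by
  have hq := clampIdx_le p row.length
  have hlen : (spliceAt row p [x]).length = row.length + 1 := by
    simp [spliceAt]
  have hcase : clampIdx p (row.length + 1) = clampIdx p row.length ∨
      clampIdx p (row.length + 1) = clampIdx p row.length + 1 := by
    unfold clampIdx; split <;> push_cast <;> omega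
  have ht : (row.take (clampIdx p row.length)).length = clampIdx p row.length := by
    simp; omega
  conv_lhs => rw [spliceAt, hlen]
  exact splice_aux _ _ x k _ _ ht hcase

-- k iterated inserts of the same element at the same position = one splice of k copies
theorem iterate_insert_eq_spliceAt (x : String) (p : Int) (k : Nat) (row : List String) :
    (fun r => PySem.List.insert r p x)^[k] row = spliceAt row p (List.replicate k x) := by
  induction k generalizing row with
  | zero => simp [spliceAt]
  | succ k ih =>
    rw [Function.iterate_succ_apply, ih, insert_eq_spliceAt, spliceAt_spliceAt]

theorem foldl_ext {α β : Type} (f g : β → α → β) (l : List α) (b : β)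
    (h : ∀ r a, f r a = g r a) : l.foldl f b = l.foldl g b := by
  induction l generalizing b with
  | nil => rfl
  | cons a t ih => simp only [List.foldl_cons, h, ih]

-- A's inner loop over range(1, m+1) = B's single splice of the block
theorem inner_loop_eq (row : List String) (p : Int) (m : Int) (x : String) :
    (PySem.List.pyRange 1 (m + 1) 1).foldl (fun r _ => PySem.List.insert r p x) row
      = spliceAt row p (List.replicate m.toNat x) := by
  rw [foldl_const_iterate, PySem.List.length_pyRange_one,
    show m + 1 - 1 = m from by ring, iterate_insert_eq_spliceAt]

-- ===== VERDICT (by name: the statement is the Claim_ definition above) =====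
theorem expand_row_spec : Claim_equal_expand_row := by
  intro u ex sign m _
  unfold Spec_expand_row expand_row expand_row_alt
  apply foldl_ext
  intro r ie
  by_cases h : ie.1 == 0
  · have h0 : ie.1 = 0 := by exact_mod_cast (beq_iff_eq.mp h)
    simp only [h0, add_zero]
    exact inner_loop_eq r ie.2 m sign
  · simp only [h, Bool.false_eq_true, if_false]
    exact inner_loop_eq r (ie.2 + m + ie.1) m sign
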